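-- pv_equiv track=rewrite | github.com/invalid-variable-51/Music-generator | Auto_music.py | filter_repeated_notes
-- ===== SOURCE A (Python) =====
-- def filter_repeated_notes(music_data, max_interval=10):
--     filtered_data = []
--     time_window = max_interval * 4  # Assuming 4 notes per second
--     for notes in music_data:
--         temp = []
--         last_notes = []
--         for i, note in enumerate(notes):
--             if note not in last_notes:
--                 temp.append(note)
--             last_notes.append(note)
--             if len(last_notes) > time_window:
--                 last_notes.pop(0)
--         filtered_data.append(temp)
--     return filtered_data
-- ===== SOURCE B (Python) =====
-- def filter_repeated_notes(music_data, max_interval=10):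
--     window = max_interval * 4  # same window (4 notes per second)
--     out = []
--     for notes in music_data:
--         last_seen = {}
--         temp = []
--         for i, note in enumerate(notes):
--             j = last_seen.get(note)
--             if j is None or i - j > window:
--                 temp.append(note)
--             last_seen[note] = i
--         out.append(temp)
--     return out
-- ===== Notes on version B (the rewrite author's own statement) =====
-- stated objective: alternative
-- what changed: Replaces the maintained last-`window` list (membership scan plus pop(0) per note) with a dict mapping each note to its last index, so the window test becomes a single lookup 'i - last_seen[note] > window'.
import Mathlib
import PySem

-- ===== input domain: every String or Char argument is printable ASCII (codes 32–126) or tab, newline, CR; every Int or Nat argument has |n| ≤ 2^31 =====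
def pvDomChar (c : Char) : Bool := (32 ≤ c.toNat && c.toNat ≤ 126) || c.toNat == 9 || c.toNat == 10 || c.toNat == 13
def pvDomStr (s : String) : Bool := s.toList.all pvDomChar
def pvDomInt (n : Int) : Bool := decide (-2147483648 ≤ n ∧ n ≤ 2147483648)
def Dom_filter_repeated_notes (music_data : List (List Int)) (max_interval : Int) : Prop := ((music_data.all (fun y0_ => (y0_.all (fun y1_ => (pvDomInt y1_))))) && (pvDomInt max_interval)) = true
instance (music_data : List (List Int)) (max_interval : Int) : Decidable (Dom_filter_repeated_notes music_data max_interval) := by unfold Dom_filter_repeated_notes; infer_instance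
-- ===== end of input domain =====

-- B replaces A's membership scan over a maintained sliding list by a dict of last-seen
-- indices with the test 'i - last_seen[note] > window' (alternative algorithm, same result).

-- ===== PORT A =====
-- inner loop body of A: append note if not in last_notes; append to last_notes; pop(0) when too long
def pvAstep (tw : Int) (st : List Int × List Int) (note : Int) : List Int × List Int :=
  let temp := if note ∈ st.2 then st.1 else st.1 ++ [note]
  let l := st.2 ++ [note]
  (temp, if (l.length : Int) > tw then l.tail else l)

def filter_repeated_notes (music_data : List (List Int)) (max_interval : Int) : List (List Int) :=
  music_data.map (fun notes => (notes.foldl (pvAstep (max_interval * 4)) ([], [])).1)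

-- ===== PORT B =====
-- inner loop of B: i is the enumerate index, d the last_seen dict, temp the output accumulator
def pvBloop (w : Int) : List Int → Int → PySem.Dict Int Int → List Int → List Int
  | [], _, _, temp => temp
  | note :: rest, i, d, temp =>
    let keep := match d.get? note with
      | none => true
      | some j => decide (i - j > w)
    pvBloop w rest (i + 1) (d.insert note i) (if keep then temp ++ [note] else temp)

def filter_repeated_notes_alt (music_data : List (List Int)) (max_interval : Int) : List (List Int) :=
  music_data.map (fun notes => pvBloop (max_interval * 4) notes 0 PySem.Dict.empty [])

-- ===== PRECONDITION & SPEC =====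
def Spec_filter_repeated_notes (music_data : List (List Int)) (max_interval : Int) (out : List (List Int)) : Prop := out = filter_repeated_notes_alt music_data max_interval
instance (music_data : List (List Int)) (max_interval : Int) (out : List (List Int)) : Decidable (Spec_filter_repeated_notes music_data max_interval out) := by unfold Spec_filter_repeated_notes; infer_instance

-- ===== CLAIM (what is proved, stated in full; the proofs are below) =====
def Claim_equal_filter_repeated_notes : Prop := ∀ (music_data : List (List Int)) (max_interval : Int), Dom_filter_repeated_notes music_data max_interval → Spec_filter_repeated_notes music_data max_interval (filter_repeated_notes music_data max_interval)

-- ===== LEMMAS AND PROOFS =====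

-- index (0-based) of the LAST occurrence of x in p, as the dict in B records it
def pvLastOcc : List Int → Int → Option Int
  | [], _ => none
  | y :: ys, x => match pvLastOcc ys x with
    | some j => some (j + 1)
    | none => if x = y then some 0 else none

theorem pvLastOcc_bounds {p : List Int} {x j : Int} (h : pvLastOcc p x = some j) :
    0 ≤ j ∧ j < p.length := by
  induction p generalizing j with
  | nil => simp [pvLastOcc] at h
  | cons y ys ih =>
    simp only [pvLastOcc] at h
    cases hy : pvLastOcc ys x with
    | some j' =>
      rw [hy] at h
      simp only [Option.some.injEq] at h
      obtain ⟨h1, h2⟩ := ih hy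
      simp only [List.length_cons]
      push_cast
      omega
    | none =>
      rw [hy] at h
      by_cases hx : x = y
      · rw [if_pos hx] at h
        simp only [Option.some.injEq] at h
        simp only [List.length_cons]
        push_cast
        omega
      · rw [if_neg hx] at h
        exact absurd h (by simp)

theorem pvLastOcc_snoc (q : List Int) (y x : Int) :
    pvLastOcc (q ++ [y]) x = if x = y then some (q.length : Int) else pvLastOcc q x := by
  induction q with
  | nil => simp [pvLastOcc]
  | cons z q' ih =>
    simp only [List.cons_append, pvLastOcc, ih]
    by_cases hx : x = y
    · simp [hx, List.length_cons]
    · simp [hx]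

theorem pv_mem_drop_lastOcc (x : Int) (k : Nat) (p : List Int) :
    x ∈ p.drop k ↔ ∃ j, pvLastOcc p x = some j ∧ (k : Int) ≤ j := by
  induction p using List.reverseRecOn with
  | nil => simp [pvLastOcc]
  | append_singleton q y ih =>
    rw [pvLastOcc_snoc]
    by_cases hx : x = y
    · subst hx
      rw [if_pos rfl]
      constructor
      · intro hm
        refine ⟨(q.length : Int), rfl, ?_⟩
        have hne : (q ++ [x]).drop k ≠ [] := by
          intro h0; rw [h0] at hm; simp at hm
        rw [ne_eq, List.drop_eq_nil_iff] at hne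
        simp at hne
        omega
      · rintro ⟨j, hj, hk⟩
        have hkq : k ≤ q.length := by
          have := hj; simp at this; omega
        rw [List.drop_append_of_le_length hkq]
        simp
    · simp only [if_neg hx]
      by_cases hk : k ≤ q.length
      · rw [List.drop_append_of_le_length hk]
        simp [List.mem_append, hx, ih]
      · have h1 : (q ++ [y]).drop k = [] := List.drop_eq_nil_of_le (by simp; omega)
        rw [h1]
        simp only [List.not_mem_nil, false_iff, not_exists, not_and]
        intro j hj
        obtain ⟨_, hlt⟩ := pvLastOcc_bounds hj
        omega

theorem pv_tail_append_singleton (xs : List Int) (y : Int) (h : xs ≠ []) :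
    (xs ++ [y]).tail = xs.tail ++ [y] := by
  cases xs with
  | nil => exact absurd rfl h
  | cons a t => simp

-- the sliding list A maintains after processing prefix p equals p.drop (p.length - tw.toNat)
theorem pv_window_step (tw : Int) (p : List Int) (y : Int) :
    (if (((p.drop (p.length - tw.toNat) ++ [y]).length : Int) > tw)
       then (p.drop (p.length - tw.toNat) ++ [y]).tail
       else p.drop (p.length - tw.toNat) ++ [y])
      = (p ++ [y]).drop ((p ++ [y]).length - tw.toNat) := by
  have hlen : (p.drop (p.length - tw.toNat)).length = p.length - (p.length - tw.toNat) := by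
    simp
  by_cases hc : p.length < tw.toNat
  · -- whole prefix fits in the window: no pop
    have h0 : p.length - tw.toNat = 0 := by omega
    have h0' : (p ++ [y]).length - tw.toNat = 0 := by simp; omega
    rw [h0, h0', List.drop_zero, List.drop_zero]
    have : ¬ (((p ++ [y]).length : Int) > tw) := by
      simp only [List.length_append, List.length_cons, List.length_nil]
      have htw : 0 < tw := by omega
      have : (p.length + 1 : Int) ≤ tw := by
        have := Int.toNat_of_nonneg (le_of_lt htw)
        omega
      omega
    rw [if_neg this]
  · -- window full (or empty): pop the oldest element
    have hgt : (((p.drop (p.length - tw.toNat) ++ [y]).length : Int) > tw) := by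
      simp only [List.length_append, hlen, List.length_cons, List.length_nil]
      have : p.length - (p.length - tw.toNat) = tw.toNat := by omega
      rw [this]
      by_cases h : tw ≤ 0
      · have h0 : tw.toNat = 0 := by omega
        rw [h0]; push_cast; omega
      · have := Int.toNat_of_nonneg (le_of_lt (by omega : (0:Int) < tw))
        push_cast; omega
    rw [if_pos hgt]
    by_cases hW : tw.toNat = 0
    · have h1 : p.length - tw.toNat = p.length := by omega
      rw [h1, List.drop_length]
      simp [hW]
    · have hklt : p.length - tw.toNat < p.length := by omega
      have hne : p.drop (p.length - tw.toNat) ≠ [] := by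
        rw [ne_eq, List.drop_eq_nil_iff]; omega
      rw [pv_tail_append_singleton _ _ hne, List.tail_drop]
      have hle : p.length - tw.toNat + 1 ≤ p.length := by omega
      have h2 : (p ++ [y]).length - tw.toNat = (p.length - tw.toNat) + 1 := by
        simp; omega
      rw [h2, List.drop_append_of_le_length hle]

-- main invariant: both inner loops agree, given that d records last occurrences of the prefix p
theorem pv_loop_eq (tw : Int) (rest : List Int) :
    ∀ (p temp : List Int) (d : PySem.Dict Int Int),
    (∀ x, d.get? x = pvLastOcc p x) →
    (rest.foldl (pvAstep tw) (temp, p.drop (p.length - tw.toNat))).1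
      = pvBloop tw rest (p.length : Int) d temp := by
  induction rest with
  | nil => intro p temp d _; simp [pvBloop]
  | cons y rest ih =>
    intro p temp d hd
    rw [List.foldl_cons]
    simp only [pvBloop]
    -- the two keep-conditions agree
    have hmem : (y ∈ p.drop (p.length - tw.toNat)) ↔
        ¬ (match d.get? y with
            | none => true
            | some j => decide ((p.length : Int) - j > tw)) = true := by
      rw [pv_mem_drop_lastOcc, hd y]
      cases hy : pvLastOcc p y with
      | none => simp
      | some j =>
        obtain ⟨h0, h1⟩ := pvLastOcc_bounds hy
        simp only [Option.some.injEq, decide_eq_true_eq]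
        constructor
        · rintro ⟨j', hj', hk⟩
          obtain rfl : j = j' := by omega
          have : ((p.length - tw.toNat : Nat) : Int) ≤ j := hk
          by_cases htw : 0 ≤ tw
          · have := Int.toNat_of_nonneg htw
            omega
          · have : tw.toNat = 0 := by omega
            omega
        · intro hle
          refine ⟨j, rfl, ?_⟩
          have hj2 : (p.length : Int) - j ≤ tw := by omega
          by_cases htw : 0 ≤ tw
          · have := Int.toNat_of_nonneg htw
            have : ((p.length - tw.toNat : Nat) : Int) ≤ j := by omega
            exact this
          · omega
    have hstep : pvAstep tw (temp, p.drop (p.length - tw.toNat)) y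
        = ((if (match d.get? y with
                 | none => true
                 | some j => decide ((p.length : Int) - j > tw)) = true
             then temp ++ [y] else temp),
           (p ++ [y]).drop ((p ++ [y]).length - tw.toNat)) := by
      simp only [pvAstep]
      simp only [Prod.mk.injEq]
      refine ⟨?_, ?_⟩
      · by_cases hm : y ∈ p.drop (p.length - tw.toNat)
        · rw [if_pos hm, if_neg (by rw [← hmem]; simpa using hm)]
        · rw [if_neg hm, if_pos (by by_contra hk; exact hm (hmem.mpr hk))]
      · exact pv_window_step tw p y
    rw [hstep]
    have hd' : ∀ x, (d.insert y (p.length : Int)).get? x = pvLastOcc (p ++ [y]) x := by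
      intro x
      rw [PySem.Dict.get?_insert, pvLastOcc_snoc, hd x]
    have := ih (p ++ [y])
      (if (match d.get? y with
            | none => true
            | some j => decide ((p.length : Int) - j > tw)) = true
        then temp ++ [y] else temp)
      (d.insert y (p.length : Int)) hd'
    rw [this]
    congr 1
    simp

theorem pv_inner_eq (tw : Int) (notes : List Int) :
    (notes.foldl (pvAstep tw) ([], [])).1 = pvBloop tw notes 0 PySem.Dict.empty [] := by
  have h := pv_loop_eq tw notes [] [] PySem.Dict.empty (by intro x; simp [pvLastOcc, PySem.Dict.get?_empty])
  simpa using h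

-- ===== VERDICT (by name: the statement is the Claim_ definition above) =====
theorem filter_repeated_notes_spec : Claim_equal_filter_repeated_notes := by
  intro music_data max_interval _
  unfold Spec_filter_repeated_notes filter_repeated_notes filter_repeated_notes_alt
  apply List.map_congr_left
  intro notes _
  exact pv_inner_eq (max_interval * 4) notes
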